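-- pv_equiv track=rewrite | github.com/denistet100/PythonBasics2 | Tetyushis_Denis_dz_5/PZ2.py | iterator_with_yield_with_sum
-- ===== SOURCE A (Python) =====
-- def iterator_with_yield_with_sum(n):
--     gen_sum = 1
--     num = 1
--     while num <= n:
--         lst = (num, gen_sum)
--         yield lst
--         num += 2
--         gen_sum = gen_sum + num
-- ===== SOURCE B (Python) =====
-- def iterator_with_yield_with_sum(n):
--     count = (n + 1) // 2
--     yield from ((2 * k + 1, (k + 1) * (k + 1)) for k in range(count))
-- ===== Notes on version B (the rewrite author's own statement) =====
-- stated objective: alternative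
-- what changed: B computes the number of odds up to n in closed form with floor division and builds the whole output with a single comprehension over range, yielding each odd number together with its square running sum, instead of A's while loop maintaining two incremental accumulators.
import Mathlib
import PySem

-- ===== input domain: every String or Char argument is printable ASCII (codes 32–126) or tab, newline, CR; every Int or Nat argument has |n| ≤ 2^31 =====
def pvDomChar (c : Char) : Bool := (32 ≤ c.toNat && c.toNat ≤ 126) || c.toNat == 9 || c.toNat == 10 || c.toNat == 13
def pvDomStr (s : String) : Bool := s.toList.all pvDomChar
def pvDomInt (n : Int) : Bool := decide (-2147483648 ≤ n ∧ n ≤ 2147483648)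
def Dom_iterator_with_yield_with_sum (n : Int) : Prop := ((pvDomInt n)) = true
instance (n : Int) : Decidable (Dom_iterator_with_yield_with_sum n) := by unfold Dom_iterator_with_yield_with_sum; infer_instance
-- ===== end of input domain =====

-- B replaces A's while loop with two running accumulators by a closed-form count (n+1)//2
-- and a single list comprehension over range; objective: alternative decomposition.

-- ===== PORT A =====
-- A's while loop: state (num, gen_sum), the yields collected into a list.
def pvLoopA (n num gen_sum : Int) : List (Int × Int) :=
  if num ≤ n then
    (num, gen_sum) :: pvLoopA n (num + 2) (gen_sum + (num + 2))
  else []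
termination_by (n + 1 - num).toNat
decreasing_by omega

def iterator_with_yield_with_sum (n : Int) : List (Int × Int) := pvLoopA n 1 1

-- ===== PORT B =====
-- B: count = (n+1)//2; [(2*k+1, (k+1)*(k+1)) for k in range(count)]
def iterator_with_yield_with_sum_alt (n : Int) : List (Int × Int) :=
  (PySem.List.pyRange 0 (PySem.Int.floordiv (n + 1) 2) 1).map
    (fun k => (2 * k + 1, (k + 1) * (k + 1)))

-- ===== PRECONDITION & SPEC =====
def Spec_iterator_with_yield_with_sum (n : Int) (out : List (Int × Int)) : Prop := out = iterator_with_yield_with_sum_alt n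
instance (n : Int) (out : List (Int × Int)) : Decidable (Spec_iterator_with_yield_with_sum n out) := by unfold Spec_iterator_with_yield_with_sum; infer_instance

-- ===== CLAIM (what is proved, stated in full; the proofs are below) =====
def Claim_equal_iterator_with_yield_with_sum : Prop := ∀ (n : Int), Dom_iterator_with_yield_with_sum n → Spec_iterator_with_yield_with_sum n (iterator_with_yield_with_sum n)

-- ===== LEMMAS AND PROOFS =====
-- Invariant: after j iterations A's state is num = 2j+1, gen_sum = (j+1)^2, and the
-- remaining yields are the mapped range [j, count).
theorem pvLoopA_eq_map_range (m : Nat) : ∀ (n j c : Int), c = PySem.Int.floordiv (n + 1) 2 →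
    (c - j).toNat ≤ m →
    pvLoopA n (2 * j + 1) ((j + 1) * (j + 1)) =
      (PySem.List.pyRange j c 1).map (fun k => (2 * k + 1, (k + 1) * (k + 1))) := by
  induction m with
  | zero =>
    intro n j c hc h
    have hjc : c ≤ j := by omega
    have hle : ¬ (2 * j + 1 ≤ n) := by
      intro hn
      have : j + 1 ≤ c := by
        rw [hc, PySem.Int.le_floordiv_iff_mul_le (by omega)]; omega
      omega
    rw [pvLoopA, if_neg hle, PySem.List.pyRange_one_eq_nil hjc, List.map_nil]
  | succ m ih =>
    intro n j c hc h
    by_cases hn : 2 * j + 1 ≤ n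
    · have hjc : j < c := by
        have : j + 1 ≤ c := by
          rw [hc, PySem.Int.le_floordiv_iff_mul_le (by omega)]; omega
        omega
      rw [pvLoopA, if_pos hn, PySem.List.pyRange_one_cons hjc, List.map_cons]
      have h1 : 2 * j + 1 + 2 = 2 * (j + 1) + 1 := by ring
      have h2 : (j + 1) * (j + 1) + (2 * (j + 1) + 1) = ((j + 1) + 1) * ((j + 1) + 1) := by ring
      rw [h1, h2, ih n (j + 1) c hc (by omega)]
    · have hjc : c ≤ j := by
        by_contra hlt
        have : j + 1 ≤ c := by omega
        rw [hc, PySem.Int.le_floordiv_iff_mul_le (by omega)] at this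
        omega
      rw [pvLoopA, if_neg hn, PySem.List.pyRange_one_eq_nil hjc, List.map_nil]

-- ===== VERDICT (by name: the statement is the Claim_ definition above) =====
theorem iterator_with_yield_with_sum_spec : Claim_equal_iterator_with_yield_with_sum := by
  intro n _
  unfold Spec_iterator_with_yield_with_sum iterator_with_yield_with_sum iterator_with_yield_with_sum_alt
  have := pvLoopA_eq_map_range (PySem.Int.floordiv (n + 1) 2 - 0).toNat n 0
    (PySem.Int.floordiv (n + 1) 2) rfl (by omega)
  simpa using this
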